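-- pv_equiv track=rewrite | github.com/Almax84/ComputerScienceDegree_ProgrammiFundamentals | esercizi_2018/esercizi_lezione_4.py | search
-- ===== SOURCE A (Python) =====
-- def search(lst,andc,orc,notc):
--
--     return_lst = []
--     for index, s in  enumerate(lst):
--         viable_and_string = True
--         viable_or_string = False
--         viable_not_string = True
--         for andc_s in andc:
--             if andc_s not in s:
--                 viable_and_string = False
--                 break
--         if len(orc) == 0:
--             viable_or_string = True
--         for orc_s in orc:
--             if orc_s in s:
--                 viable_or_string = True
--         for notc_s in notc:
--             if notc_s in s:
--                 viable_not_string = False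
--
--         if viable_and_string and viable_not_string and viable_or_string:
--             return_lst.append(s)
--
--     return return_lst
-- ===== SOURCE B (Python) =====
-- def search(lst, andc, orc, notc):
--     # Index-set algorithm: iterate over the CONDITION strings (not the data),
--     # narrowing a list of surviving indices, then rebuild the output from indices.
--     keep = list(range(len(lst)))
--     for a in andc:
--         keep = [i for i in keep if a in lst[i]]
--     if orc:
--         hit = set()
--         for o in orc:
--             for i in keep:
--                 if o in lst[i]:
--                     hit.add(i)
--         keep = [i for i in keep if i in hit]
--     for t in notc:
--         keep = [i for i in keep if t not in lst[i]]
--     return [lst[i] for i in keep]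
-- ===== Notes on version B (the rewrite author's own statement) =====
-- stated objective: alternative
-- what changed: Replaced A's single data-driven loop with per-string boolean flags by a condition-driven index-set algorithm: B keeps a list of surviving indices, loops over the condition strings (outer) narrowing the index list per condition, collects OR hits into a set of indices, and rebuilds the output from the surviving indices; A scans every OR/NOT condition against every string even when the AND test already failed, while B only tests conditions against surviving indices, so each pass shrinks the work.
import Mathlib
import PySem

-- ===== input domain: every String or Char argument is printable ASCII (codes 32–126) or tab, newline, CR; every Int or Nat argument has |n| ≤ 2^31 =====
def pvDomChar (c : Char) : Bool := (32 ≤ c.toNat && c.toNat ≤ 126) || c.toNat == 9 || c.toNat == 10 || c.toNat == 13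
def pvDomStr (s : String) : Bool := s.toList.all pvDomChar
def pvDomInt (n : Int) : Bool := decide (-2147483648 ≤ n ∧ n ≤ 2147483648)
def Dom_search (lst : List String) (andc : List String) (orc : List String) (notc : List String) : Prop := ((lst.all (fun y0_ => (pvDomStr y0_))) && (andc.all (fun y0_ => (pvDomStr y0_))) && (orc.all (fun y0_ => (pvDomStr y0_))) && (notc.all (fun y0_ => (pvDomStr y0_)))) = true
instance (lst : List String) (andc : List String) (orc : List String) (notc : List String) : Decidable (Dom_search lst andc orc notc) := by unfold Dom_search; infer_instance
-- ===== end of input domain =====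

-- ===== PORT A =====
-- B replaces A's single data-driven flag loop by a condition-driven index-set algorithm that only tests conditions against surviving indices (objective: alternative).
def search (lst : List String) (andc : List String) (orc : List String) (notc : List String) : List String :=
  lst.foldl (fun return_lst s =>
    let viable_and_string := andc.all (fun andc_s => PySem.Str.isIn andc_s s)
    let viable_or_string := decide (orc.length = 0)
    let viable_or_string := orc.foldl (fun b orc_s => if PySem.Str.isIn orc_s s then true else b) viable_or_string
    let viable_not_string := notc.foldl (fun b notc_s => if PySem.Str.isIn notc_s s then false else b) true
    if viable_and_string && viable_not_string && viable_or_string then return_lst ++ [s] else return_lst) []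

-- ===== PORT B =====
def search_alt (lst : List String) (andc : List String) (orc : List String) (notc : List String) : List String :=
  let keep0 := PySem.List.pyRange 0 (lst.length : Int) 1
  let keep1 := andc.foldl (fun keep a => keep.filter (fun i => PySem.Str.isIn a (PySem.List.pyGetD lst i ""))) keep0
  let keep2 :=
    if orc.isEmpty then keep1 else
      let hit : PySem.Set Int := orc.foldl (fun hit o =>
        keep1.foldl (fun hit i => if PySem.Str.isIn o (PySem.List.pyGetD lst i "") then PySem.Set.add hit i else hit) hit) PySem.Set.empty
      keep1.filter (fun i => PySem.Set.contains hit i)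
  let keep3 := notc.foldl (fun keep t => keep.filter (fun i => !(PySem.Str.isIn t (PySem.List.pyGetD lst i "")))) keep2
  keep3.map (fun i => PySem.List.pyGetD lst i "")

-- ===== PRECONDITION & SPEC =====
def Spec_search (lst : List String) (andc : List String) (orc : List String) (notc : List String) (out : List String) : Prop := out = search_alt lst andc orc notc
instance (lst : List String) (andc : List String) (orc : List String) (notc : List String) (out : List String) : Decidable (Spec_search lst andc orc notc out) := by unfold Spec_search; infer_instance

-- ===== CLAIM (what is proved, stated in full; the proofs are below) =====
def Claim_equal_search : Prop := ∀ (lst : List String) (andc : List String) (orc : List String) (notc : List String), Dom_search lst andc orc notc → Spec_search lst andc orc notc (search lst andc orc notc)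

-- ===== LEMMAS AND PROOFS =====

-- A's OR flag loop computes 'init || any'.
lemma foldl_or_eq {α : Type} (f : α → Bool) (l : List α) (init : Bool) :
    l.foldl (fun b o => if f o then true else b) init = (init || l.any f) := by
  induction l generalizing init with
  | nil => simp
  | cons h t ih =>
    rw [List.foldl_cons, List.any_cons]
    cases hf : f h
    · rw [if_neg (by simp), ih]; simp
    · simp only [if_true]; rw [ih]; simp

-- A's NOT flag loop computes 'init && !any'.
lemma foldl_not_eq {α : Type} (f : α → Bool) (l : List α) (init : Bool) :
    l.foldl (fun b n => if f n then false else b) init = (init && !(l.any f)) := by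
  induction l generalizing init with
  | nil => simp
  | cons h t ih =>
    rw [List.foldl_cons, List.any_cons]
    cases hf : f h
    · rw [if_neg (by simp), ih]; simp
    · simp only [if_true]; rw [ih]; simp

-- A sequence of filter passes over the condition list is one filter by 'all'.
lemma foldl_filter_eq {α β : Type} (p : β → α → Bool) (cs : List β) (k0 : List α) :
    cs.foldl (fun k c => k.filter (p c)) k0 = k0.filter (fun i => cs.all (fun c => p c i)) := by
  induction cs generalizing k0 with
  | nil => simp
  | cons c cs ih =>
    rw [List.foldl_cons, ih, List.filter_filter]
    simp [Bool.and_comm]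

-- Membership in the inner OR-hit accumulation.
lemma mem_inner_hit {α : Type} [DecidableEq α] (q : α → Bool) (keep : List α) (h0 : PySem.Set α) (j : α) :
    (j ∈ keep.foldl (fun h i => if q i then PySem.Set.add h i else h) h0) ↔ (j ∈ h0 ∨ (j ∈ keep ∧ q j)) := by
  induction keep generalizing h0 with
  | nil => simp
  | cons i t ih =>
    rw [List.foldl_cons]
    cases hq : q i
    · simp only [Bool.false_eq_true, if_false, ih, List.mem_cons]
      constructor
      · rintro (h | ⟨h1, h2⟩)
        · exact Or.inl h
        · exact Or.inr ⟨Or.inr h1, h2⟩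
      · rintro (h | ⟨(rfl | h1), h2⟩)
        · exact Or.inl h
        · exact absurd h2 (by simp [hq])
        · exact Or.inr ⟨h1, h2⟩
    · simp only [if_true, ih, PySem.Set.mem_add, List.mem_cons]
      constructor
      · rintro ((h | rfl) | ⟨h1, h2⟩)
        · exact Or.inl h
        · exact Or.inr ⟨Or.inl rfl, hq⟩
        · exact Or.inr ⟨Or.inr h1, h2⟩
      · rintro (h | ⟨(rfl | h1), h2⟩)
        · exact Or.inl (Or.inl h)
        · exact Or.inl (Or.inr rfl)
        · exact Or.inr ⟨h1, h2⟩

-- Membership in the full OR-hit set.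
lemma mem_hit {α : Type} [DecidableEq α] (q : String → α → Bool) (orc : List String) (keep : List α) (h0 : PySem.Set α) (j : α) :
    (j ∈ orc.foldl (fun h o => keep.foldl (fun h i => if q o i then PySem.Set.add h i else h) h) h0) ↔
      (j ∈ h0 ∨ (j ∈ keep ∧ orc.any (fun o => q o j))) := by
  induction orc generalizing h0 with
  | nil => simp
  | cons o os ih =>
    rw [List.foldl_cons, ih, mem_inner_hit, List.any_cons]
    constructor
    · rintro ((h | ⟨h1, h2⟩) | ⟨h1, h2⟩)
      · exact Or.inl h
      · exact Or.inr ⟨h1, by simp [h2]⟩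
      · exact Or.inr ⟨h1, by simp [h2]⟩
    · rintro (h | ⟨h1, h2⟩)
      · exact Or.inl (Or.inl h)
      · rcases (by simpa using h2 : q o j = true ∨ os.any (fun o => q o j) = true) with h2 | h2
        · exact Or.inl (Or.inr ⟨h1, h2⟩)
        · exact Or.inr ⟨h1, h2⟩

-- Filtering the index range by P ∘ getD and reading back the elements is filtering the list.
lemma range_filter_map {α : Type} [Inhabited α] (xs : List α) (P : α → Bool) (d : α) :
    ((List.range xs.length).filter (fun k => P (xs.getD k d))).map (fun k => xs.getD k d) = xs.filter P := by
  induction xs with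
  | nil => simp
  | cons x ys ih =>
    have hc : ((fun k => P ((x :: ys).getD k d)) ∘ Nat.succ) = fun k => P (ys.getD k d) := by
      funext k; simp
    have hm : ((fun k : Nat => (x :: ys).getD k d) ∘ Nat.succ) = fun k => ys.getD k d := by
      funext k; simp
    simp only [List.length_cons, List.range_succ_eq_map, List.filter_cons, List.getD_cons_zero,
      List.filter_map]
    cases hP : P x
    · simp only [Bool.false_eq_true, if_false, List.map_map, hc, hm, ih]
    · simp only [if_true, List.map_cons, List.getD_cons_zero, List.map_map, hc, hm, ih]

-- The pyRange/pyGetD Int-indexed version of range_filter_map.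
lemma pyrange_filter_map (xs : List String) (P : String → Bool) :
    ((PySem.List.pyRange 0 (xs.length : Int) 1).filter (fun i => P (PySem.List.pyGetD xs i ""))).map
        (fun i => PySem.List.pyGetD xs i "") = xs.filter P := by
  rw [PySem.List.pyRange_one]
  rw [List.filter_map, List.map_map]
  have h1 : ((fun i => P (PySem.List.pyGetD xs i "")) ∘ fun k : Nat => (0 : Int) + k) = fun k : Nat => P (xs.getD k "") := by
    funext k; simp
  have h2 : ((fun i => PySem.List.pyGetD xs i "") ∘ fun k : Nat => (0 : Int) + k) = fun k : Nat => xs.getD k "" := by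
    funext k; simp
  rw [h1, h2]
  have h3 : ((xs.length : Int) - 0).toNat = xs.length := by omega
  rw [h3]
  exact range_filter_map xs P ""

-- ===== VERDICT (by name: the statement is the Claim_ definition above) =====
theorem search_spec : Claim_equal_search := by
  intro lst andc orc notc _
  unfold Spec_search search search_alt
  rw [PySem.List.foldl_append_if_eq_filter]
  simp only [List.nil_append, foldl_or_eq, foldl_not_eq, Bool.true_and, foldl_filter_eq]
  cases orc with
  | nil =>
    simp only [List.isEmpty_nil, if_true, List.filter_filter]
    rw [pyrange_filter_map lst
      (fun s => (notc.all fun c => !PySem.Str.isIn c s) && andc.all fun c => PySem.Str.isIn c s)]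
    apply List.filter_congr
    intro s _
    simp only [List.length_nil, List.any_nil, Bool.or_false, List.all_eq_not_any_not, Bool.not_not]
    cases andc.all (fun c => PySem.Str.isIn c s) <;>
      cases notc.any (fun c => PySem.Str.isIn c s) <;> simp
  | cons o os =>
    simp only [List.isEmpty_cons, Bool.false_eq_true, if_false, List.filter_filter]
    have key : ∀ a ∈ PySem.List.pyRange 0 (lst.length : Int) 1,
        ((notc.all fun c => !PySem.Str.isIn c (PySem.List.pyGetD lst a "")) &&
          ((List.foldl (fun hit o' =>
              List.foldl (fun hit i =>
                  if PySem.Str.isIn o' (PySem.List.pyGetD lst i "") = true then PySem.Set.add hit i else hit)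
                hit
                (List.filter (fun i => andc.all fun c => PySem.Str.isIn c (PySem.List.pyGetD lst i ""))
                  (PySem.List.pyRange 0 (lst.length : Int) 1)))
            PySem.Set.empty (o :: os)).contains a &&
          andc.all fun c => PySem.Str.isIn c (PySem.List.pyGetD lst a "")))
        = ((notc.all fun c => !PySem.Str.isIn c (PySem.List.pyGetD lst a "")) &&
            (((o :: os).any fun o' => PySem.Str.isIn o' (PySem.List.pyGetD lst a "")) &&
              andc.all fun c => PySem.Str.isIn c (PySem.List.pyGetD lst a ""))) := by
      intro a ha
      have hmem := mem_hit (fun o' i => PySem.Str.isIn o' (PySem.List.pyGetD lst i "")) (o :: os)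
        (List.filter (fun i => andc.all fun c => PySem.Str.isIn c (PySem.List.pyGetD lst i ""))
          (PySem.List.pyRange 0 (lst.length : Int) 1)) PySem.Set.empty a
      cases hA : (andc.all fun c => PySem.Str.isIn c (PySem.List.pyGetD lst a ""))
      · simp
      · have hkeep : a ∈ List.filter (fun i => andc.all fun c => PySem.Str.isIn c (PySem.List.pyGetD lst i ""))
            (PySem.List.pyRange 0 (lst.length : Int) 1) := List.mem_filter.mpr ⟨ha, hA⟩
        cases hO : ((o :: os).any fun o' => PySem.Str.isIn o' (PySem.List.pyGetD lst a ""))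
        · have hnot : a ∉ (List.foldl (fun hit o' =>
              List.foldl (fun hit i =>
                  if PySem.Str.isIn o' (PySem.List.pyGetD lst i "") = true then PySem.Set.add hit i else hit)
                hit
                (List.filter (fun i => andc.all fun c => PySem.Str.isIn c (PySem.List.pyGetD lst i ""))
                  (PySem.List.pyRange 0 (lst.length : Int) 1)))
            PySem.Set.empty (o :: os)) := by
            rw [hmem]
            rintro (h | ⟨_, h2⟩)
            · simp [PySem.Set.empty] at h
            · rw [hO] at h2; exact absurd h2 (by simp)
          have : (List.foldl (fun hit o' =>
              List.foldl (fun hit i =>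
                  if PySem.Str.isIn o' (PySem.List.pyGetD lst i "") = true then PySem.Set.add hit i else hit)
                hit
                (List.filter (fun i => andc.all fun c => PySem.Str.isIn c (PySem.List.pyGetD lst i ""))
                  (PySem.List.pyRange 0 (lst.length : Int) 1)))
            PySem.Set.empty (o :: os)).contains a = false := by
            rw [Bool.eq_false_iff]
            simp only [ne_eq, PySem.Set.contains_eq_listContains, List.contains_iff_mem]
            exact hnot
          simp only [this]
        · have hin : a ∈ (List.foldl (fun hit o' =>
              List.foldl (fun hit i =>
                  if PySem.Str.isIn o' (PySem.List.pyGetD lst i "") = true then PySem.Set.add hit i else hit)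
                hit
                (List.filter (fun i => andc.all fun c => PySem.Str.isIn c (PySem.List.pyGetD lst i ""))
                  (PySem.List.pyRange 0 (lst.length : Int) 1)))
            PySem.Set.empty (o :: os)) := by
            rw [hmem]; exact Or.inr ⟨hkeep, hO⟩
          have : (List.foldl (fun hit o' =>
              List.foldl (fun hit i =>
                  if PySem.Str.isIn o' (PySem.List.pyGetD lst i "") = true then PySem.Set.add hit i else hit)
                hit
                (List.filter (fun i => andc.all fun c => PySem.Str.isIn c (PySem.List.pyGetD lst i ""))
                  (PySem.List.pyRange 0 (lst.length : Int) 1)))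
            PySem.Set.empty (o :: os)).contains a = true := by
            simp only [PySem.Set.contains_eq_listContains, List.contains_iff_mem]
            exact hin
          simp only [this]
    rw [List.filter_congr key]
    rw [pyrange_filter_map lst
      (fun s => (notc.all fun c => !PySem.Str.isIn c s) &&
        (((o :: os).any fun o' => PySem.Str.isIn o' s) && andc.all fun c => PySem.Str.isIn c s))]
    apply List.filter_congr
    intro s _
    simp only [List.length_cons, List.all_eq_not_any_not, Bool.not_not]
    cases andc.all (fun c => PySem.Str.isIn c s) <;>
      cases (o :: os).any (fun o' => PySem.Str.isIn o' s) <;>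
        cases notc.any (fun c => PySem.Str.isIn c s) <;> simp
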